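/- GENERATED by tools/from_farm_form.py from prooffarm-gif/accepted/DGifDecreaseImageCounter.2/Proof.lean (a worked proof of the farm's unit `DGifDecreaseImageCounter.2`,
   accepted by the verdict) — do not edit. -/
import Gif.Spec.Units.DGifDecreaseImageCounter_2
import Gif.Spec.AllSegs
import Gif.Spec.Proved.DGifDecreaseImageCounter_2_Lemmas

open X86 X86.User Asan ProgX.Base ProgX.Base.Spec Gif.Spec

/-!
  `DGifDecreaseImageCounter.2` (0x10a4b1 … 0x10a4f2, 16 instructions; dgif_lib.c:1161-1163): the dropped slot's colour map is
  freed, if there is one. The ghost `g.cm` decides which path the machine takes (`AfterRaster.cm`: the slot's field holds NULL or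
  `m.obj`); each path is one lemma of Lemmas.lean.
-/

/-- Segment 2 of `DGifDecreaseImageCounter` takes `AfterRaster` at 0x10a4b1 to `AfterMap` at 0x10a4f2. -/
theorem Gif.Spec.Proved.DGifDecreaseImageCounter_2_ok : Gif.Spec.DGifDecreaseImageCounter_2.Statement := by
  intro Lay hLay μ hμ u₀ hcode h_GifFreeMapObject h_asan_load8_noabort h_asan_load4_noabort
  intro H rest frames F R init g s Hc e ret v hat
  cases hcm : g.cm with
  | none =>
    -- 0x10a4eb `je` taken: `sp->ImageDesc.ColorMap == NULL`
    exact Gif.Spec.DGifDecreaseImageCounter_2.dic2_none Lay hLay μ hμ u₀ hcode h_asan_load8_noabort h_asan_load4_noabort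
      H rest frames F R init g s Hc e ret v hat hcm
  | some m =>
    -- 0x10a4ed `call GifFreeMapObject` (dgif_lib.c:1162)
    exact Gif.Spec.DGifDecreaseImageCounter_2.dic2_some Lay hLay μ hμ u₀ hcode h_asan_load8_noabort h_asan_load4_noabort
      H rest frames F R init g s Hc e ret v h_GifFreeMapObject hat m hcm
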